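-- pv_equiv track=rewrite | github.com/Yeonsu-Sim/newtopia | data-pipeline/jobs/raw_to_clean.py | split_to_bands
-- ===== SOURCE A (Python) =====
-- def split_to_bands(simv: int, bands: int, bbits: int):
--     mask = (1 << bbits) - 1
--     out = []
--     for b in range(bands):
--         shift = b * bbits
--         prefix = (simv >> shift) & mask
--         out.append((b, f"{prefix:0{(bbits+3)//4}x}"))
--     return out
-- ===== SOURCE B (Python) =====
-- def split_to_bands(simv: int, bands: int, bbits: int):
--     # Stage 1: expand simv into its base-(2**bbits) digits (pure integer arithmetic
--     # via divmod; Python's floor divmod matches arithmetic >> and & mask exactly).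
--     base = 1 << bbits
--     digits = []
--     q = simv
--     for _ in range(bands):
--         q, r = divmod(q, base)
--         digits.append(r)
--     # Stage 2: format the digits.
--     width = (bbits + 3) // 4
--     return [(b, format(d, "0%dx" % width)) for b, d in enumerate(digits)]
-- ===== Notes on version B (the rewrite author's own statement) =====
-- stated objective: alternative
-- what changed: B drops A's per-band bitwise extraction ((simv >> b*bbits) & mask) entirely: it first expands simv into its base-2**bbits digit list by repeated divmod (pure integer arithmetic, no shifts or masks), then formats the digits in a separate enumerate pass.
import Mathlib
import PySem

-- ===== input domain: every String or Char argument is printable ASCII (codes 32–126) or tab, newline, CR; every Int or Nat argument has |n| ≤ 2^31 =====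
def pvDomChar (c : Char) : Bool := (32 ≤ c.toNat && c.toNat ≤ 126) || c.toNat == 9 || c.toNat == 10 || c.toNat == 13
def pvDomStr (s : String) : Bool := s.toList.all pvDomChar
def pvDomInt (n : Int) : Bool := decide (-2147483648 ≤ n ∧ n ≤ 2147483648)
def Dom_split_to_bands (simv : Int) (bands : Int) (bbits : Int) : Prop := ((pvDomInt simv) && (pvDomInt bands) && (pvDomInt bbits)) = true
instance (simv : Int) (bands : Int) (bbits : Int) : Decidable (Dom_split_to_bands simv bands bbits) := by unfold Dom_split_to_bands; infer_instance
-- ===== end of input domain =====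

-- B replaces A's bitwise shift-and-mask band extraction with a two-stage pass:
-- first an arithmetic base-(2^bbits) digit expansion of simv via divmod, then a
-- separate formatting pass over enumerate(digits) (objective: alternative).


-- shared helper: Python's f"{p:0{w}x}" / format(p, "0<w>x") for a nonnegative p
-- (both programs only ever format values masked/reduced into [0, 2^bbits), so
-- nonnegative under Pre_; exact there: lowercase hex, zero-padded to width w)
def pvHexFmt (p : Int) (w : Int) : String :=
  PySem.Str.zfill (String.ofList (Nat.toDigits 16 p.toNat)) w

-- ===== PORT A =====
def split_to_bands (simv : Int) (bands : Int) (bbits : Int) : List (Int × String) :=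
  let mask : Int := ((1:Int) <<< bbits.toNat) - 1
  (PySem.List.pyRange 0 bands 1).foldl
    (fun out b =>
      let shift := b * bbits
      let pre := PySem.Int.band (simv >>> shift.toNat) mask
      out ++ [(b, pvHexFmt pre (PySem.Int.floordiv (bbits + 3) 4))])
    []

-- ===== PORT B =====
-- stage 1 of Source B: the base-(2^bbits) digits of simv, low digit first (divmod loop)
def pvDigits (base : Int) (q : Int) : Nat → List Int
  | 0 => []
  | n + 1 => PySem.Int.mod q base :: pvDigits base (PySem.Int.floordiv q base) n

def split_to_bands_alt (simv : Int) (bands : Int) (bbits : Int) : List (Int × String) :=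
  let base : Int := (1:Int) <<< bbits.toNat
  let digits := pvDigits base simv bands.toNat
  let w : Int := PySem.Int.floordiv (bbits + 3) 4
  (PySem.List.enumerate digits 0).map (fun p => (p.1, pvHexFmt p.2 w))

-- ===== PRECONDITION & SPEC =====
-- Pre_ excludes bbits < 0, where Python's `1 << bbits` raises ValueError in both programs.
def Pre_split_to_bands (simv : Int) (bands : Int) (bbits : Int) : Prop := 0 ≤ bbits
instance (simv : Int) (bands : Int) (bbits : Int) : Decidable (Pre_split_to_bands simv bands bbits) := by unfold Pre_split_to_bands; infer_instance
def pvWitness_split_to_bands : Int × Int × Int := (255, 3, 4)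

def Spec_split_to_bands (simv : Int) (bands : Int) (bbits : Int) (out : List (Int × String)) : Prop := out = split_to_bands_alt simv bands bbits
instance (simv : Int) (bands : Int) (bbits : Int) (out : List (Int × String)) : Decidable (Spec_split_to_bands simv bands bbits out) := by unfold Spec_split_to_bands; infer_instance

-- ===== CLAIM =====
def Claim_equal_split_to_bands : Prop := ∀ (simv : Int) (bands : Int) (bbits : Int), Dom_split_to_bands simv bands bbits → Pre_split_to_bands simv bands bbits → Spec_split_to_bands simv bands bbits (split_to_bands simv bands bbits)

-- ===== LEMMAS AND PROOFS =====

-- Python's infinite-two's-complement AND with an all-ones mask is reduction mod 2^k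
theorem pv_band_mask (x : Int) (k : Nat) : PySem.Int.band x ((2:Int)^k - 1) = x % ((2:Int)^k) := by
  have h1 : (1:Int) ≤ (2:Int)^k := one_le_pow₀ (by norm_num)
  have hm : (0:Int) ≤ (2:Int)^k - 1 := by omega
  have hmt : ((2:Int)^k - 1).toNat = 2^k - 1 := by
    have : ((2:Int)^k).toNat = 2^k := by rw [show ((2:Int)^k) = ((2^k:Nat):Int) by push_cast; ring, Int.toNat_natCast]
    omega
  by_cases hx : 0 ≤ x
  · rw [PySem.Int.band_of_nonneg hx hm, hmt, Nat.and_two_pow_sub_one_eq_mod]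
    push_cast
    rw [Int.toNat_of_nonneg hx]
  · unfold PySem.Int.band
    rw [if_neg (by omega), if_pos hm, hmt, Nat.land_comm, Nat.and_two_pow_sub_one_eq_mod]
    have hy : (0:Int) ≤ -x - 1 := by omega
    set y : Nat := (-x - 1).toNat with hyd
    have hcast : (y : Int) = -x - 1 := Int.toNat_of_nonneg hy
    have hdm : 2^k * (y / 2^k) + y % 2^k = y := Nat.div_add_mod y (2^k)
    have hdmI : (2:Int)^k * ((y / 2^k : Nat) : Int) + ((y % 2^k : Nat) : Int) = -x - 1 := by
      rw [← hcast]; exact_mod_cast hdm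
    have hrlt : ((y % 2^k : Nat) : Int) < (2:Int)^k := by
      exact_mod_cast Nat.mod_lt y (y := 2^k) (by positivity)
    have hrge : (0:Int) ≤ ((y % 2^k : Nat) : Int) := by positivity
    have hx2 : x = ((2:Int)^k - 1 - ((y % 2^k : Nat) : Int)) + (2:Int)^k * (-((y / 2^k : Nat) : Int) - 1) := by
      ring_nf
      ring_nf at hdmI
      linarith
    conv_rhs => rw [hx2]
    rw [Int.add_mul_emod_self_left, Int.emod_eq_of_lt (by linarith) (by linarith)]
    have h2 : ((2^k : Nat) : Int) = (2:Int)^k := by push_cast; ring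
    have hmodlt : y % 2^k < 2^k := Nat.mod_lt y (by positivity)
    omega

theorem pv_one_shiftLeft (k : Nat) : (1:Int) <<< k = (2:Int)^k := by
  simp [Int.shiftLeft_eq]

theorem pvToNat_cast_mul (i : Nat) (b : Int) (hb : 0 ≤ b) : ((i : Int) * b).toNat = i * b.toNat := by
  rcases Int.eq_ofNat_of_zero_le hb with ⟨n, rfl⟩
  rw [← Int.natCast_mul, Int.toNat_natCast, Int.toNat_natCast]

-- B's digit loop, characterised in closed form (base = 2^k > 0)
theorem pvDigits_eq (k : Nat) :
    ∀ (n : Nat) (q : Int),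
      pvDigits ((2:Int)^k) q n =
        (List.range n).map (fun i => q / ((2:Int)^(k * i)) % ((2:Int)^k)) := by
  have hpos : (0:Int) < (2:Int)^k := by positivity
  intro n
  induction n with
  | zero => intro q; simp [pvDigits]
  | succ n ih =>
    intro q
    rw [List.range_succ_eq_map]
    simp only [pvDigits, List.map_cons, List.map_map,
      PySem.Int.mod_eq_emod_of_pos hpos, PySem.Int.floordiv_eq_ediv_of_pos hpos]
    congr 1
    · simp
    · rw [ih]
      apply List.map_congr_left
      intro i _
      simp only [Function.comp_apply]
      rw [Int.ediv_ediv_of_nonneg (le_of_lt hpos), ← pow_add]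
      have he : k + k * i = k * i.succ := by rw [Nat.succ_eq_add_one]; ring
      rw [he]

-- enumerate over a mapped range is the mapped range of pairs
theorem pv_enumerate_map_range {α : Type} (f : Nat → α) (n : Nat) :
    PySem.List.enumerate ((List.range n).map f) 0 =
      (List.range n).map (fun (i : Nat) => ((i : Int), f i)) := by
  apply List.ext_getElem
  · simp [PySem.List.length_enumerate]
  · intro k h1 h2
    simp [PySem.List.getElem_enumerate, List.getElem_map, List.getElem_range]

theorem split_to_bands_spec : Claim_equal_split_to_bands := by
  intro simv bands bbits _ hpre
  unfold Spec_split_to_bands split_to_bands split_to_bands_alt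
  unfold Pre_split_to_bands at hpre
  have hb0 : (bands - 0).toNat = bands.toNat := by omega
  simp only [PySem.List.foldl_append_singleton_eq_map, List.nil_append, PySem.List.pyRange_one,
      pv_one_shiftLeft, pvDigits_eq bbits.toNat, pv_enumerate_map_range, List.map_map, hb0]
  apply List.map_congr_left
  intro i _
  simp only [Function.comp_apply, zero_add, Prod.mk.injEq]
  refine ⟨trivial, ?_⟩
  rw [pvToNat_cast_mul i bbits hpre, pv_band_mask, Int.shiftRight_eq_div_pow,
    show ((2 ^ (i * bbits.toNat) : Nat) : Int) = (2:Int) ^ (bbits.toNat * i) by push_cast; rw [Nat.mul_comm]]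

-- ===== VERDICT ===== (theorem split_to_bands_spec above proves Claim_equal_split_to_bands)
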